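-- pv_equiv track=rewrite | github.com/Saahil-Agr/CS221-project | main.py | outputTrimmedBoard
-- ===== SOURCE A (Python) =====
-- def numRows(l):
--     return len(l)
--
-- def numCols(l):
--     '''
--     Assumes that each sub list has the same number of elements. Grid representation in lists essentially
--     :param l: a list of lists
--     :return: length of a sub list of the lists
--     '''
--     return len(l[0])
--
-- def outputTrimmedBoard(board):
--     minC = numCols(board) - 1
--     maxC = 0
--     minR = numRows(board) - 1
--     maxR = 0
--     for r in range(0, numRows(board)):
--         for c in range(0, numCols(board)):
--             if board[r][c] != ' ':
--                 minC = min(minC, c)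
--                 minR = min(minR, r)
--                 maxC = max(maxC, c)
--                 maxR = max(maxR, r)
--     newC = maxC - minC + 1
--     newR = maxR - minR + 1
--     trimmed = [[' ' for ii in range(newC)] for i in range(newR)]
--     for r in range(newR):
--         for c in range(newC):
--             trimmed[r][c] = board[minR + r][minC + c]
--     return trimmed
-- ===== SOURCE B (Python) =====
-- def outputTrimmedBoard(board):
--     cols = range(len(board[0]))
--     rows_with = [r for r, row in enumerate(board)
--                  if any(row[c] != ' ' for c in cols)]
--     if not rows_with:
--         return []
--     cols_with = [c for c in cols
--                  if any(row[c] != ' ' for row in board)]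
--     return [row[min(cols_with):max(cols_with) + 1]
--             for row in board[min(rows_with):max(rows_with) + 1]]
-- ===== Notes on version B (the rewrite author's own statement) =====
-- stated objective: alternative
-- what changed: Replaced A's single nested row-by-column scan updating four seeded extrema and its index-by-index rebuild with two axis-projection passes (rows/columns containing a non-space cell), min/max over those projections, and list slicing; an all-space board yields the empty list.
-- intended difference: On a board whose single row is entirely spaces, A returns the leftover of its extrema seeds ([[' ']] for a 1-cell row, [[]] for a wider row) while B returns [], the bounding box of empty content, which is the intended trim. — e.g. on outputTrimmedBoard([[" "]]): A returns [[" "]], B returns []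
import Mathlib
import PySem

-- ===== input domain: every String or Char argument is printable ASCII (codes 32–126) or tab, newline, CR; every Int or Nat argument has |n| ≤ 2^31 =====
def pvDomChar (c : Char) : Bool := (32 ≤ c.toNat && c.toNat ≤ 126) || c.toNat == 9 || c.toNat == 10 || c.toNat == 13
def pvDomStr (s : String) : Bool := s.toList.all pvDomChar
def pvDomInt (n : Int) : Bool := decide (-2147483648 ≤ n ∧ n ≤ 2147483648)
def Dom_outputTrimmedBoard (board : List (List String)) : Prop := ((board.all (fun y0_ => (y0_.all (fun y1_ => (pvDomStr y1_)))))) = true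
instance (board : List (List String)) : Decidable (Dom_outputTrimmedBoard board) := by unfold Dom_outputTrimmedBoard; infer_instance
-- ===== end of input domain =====

-- B trims to the bounding box by two axis-projection passes plus slicing instead of A's
-- nested extrema scan and index rebuild; on an all-space board B returns [] (objective: alternative).

-- ===== PORT A =====
def outputTrimmedBoard (board : List (List String)) : List (List String) :=
  let R : Int := (board.length : Int)
  let C : Int := (((PySem.List.pyGet? board 0).getD []).length : Int)
  let s := (PySem.List.pyRange 0 R).foldl (fun s r =>
      (PySem.List.pyRange 0 C).foldl (fun s c =>
        if PySem.List.pyGetD (PySem.List.pyGetD board r []) c "" ≠ " " then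
          (min s.1 c, min s.2.1 r, max s.2.2.1 c, max s.2.2.2 r)
        else s) s)
    ((C - 1, R - 1, 0, 0) : Int × Int × Int × Int)
  let newC := s.2.2.1 - s.1 + 1
  let newR := s.2.2.2 - s.2.1 + 1
  (PySem.List.pyRange 0 newR).map (fun r =>
    (PySem.List.pyRange 0 newC).map (fun c =>
      PySem.List.pyGetD (PySem.List.pyGetD board (s.2.1 + r) []) (s.1 + c) ""))

-- ===== PORT B =====
-- width of the board: len(board[0]) (the `cols` range bound of Source B)
def altC (board : List (List String)) : Int :=
  (((PySem.List.pyGet? board 0).getD []).length : Int)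
-- rows_with: indices of rows containing a non-space cell
def altRowsWith (board : List (List String)) : List Int :=
  (PySem.List.enumerate board).filterMap (fun p =>
    if (PySem.List.pyRange 0 (altC board)).any (fun c => PySem.List.pyGetD p.2 c "" ≠ " ")
    then some p.1 else none)
-- cols_with: indices of columns containing a non-space cell
def altColsWith (board : List (List String)) : List Int :=
  (PySem.List.pyRange 0 (altC board)).filter (fun c =>
    board.any (fun row => PySem.List.pyGetD row c "" ≠ " "))
def outputTrimmedBoard_alt (board : List (List String)) : List (List String) :=
  let rowsWith := altRowsWith board
  if rowsWith.isEmpty then []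
  else
    let colsWith := altColsWith board
    let mnR := (PySem.List.min? rowsWith (fun x => x)).getD 0
    let mxR := (PySem.List.max? rowsWith (fun x => x)).getD 0
    let mnC := (PySem.List.min? colsWith (fun x => x)).getD 0
    let mxC := (PySem.List.max? colsWith (fun x => x)).getD 0
    (PySem.List.slice board (some mnR) (some (mxR + 1))).map (fun row =>
      PySem.List.slice row (some mnC) (some (mxC + 1)))

-- ===== PRECONDITION & SPEC =====
-- Pre_ is exactly the inputs on which the Python A returns: A raises IndexError on an empty
-- board, on a row shorter than the first row, and on the 1×0 board [[]].
def Pre_outputTrimmedBoard (board : List (List String)) : Prop :=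
  board ≠ [] ∧ (∀ row ∈ board, (board.headD []).length ≤ row.length) ∧
    ¬(board.length = 1 ∧ board.headD [] = [])
instance (board : List (List String)) : Decidable (Pre_outputTrimmedBoard board) := by
  unfold Pre_outputTrimmedBoard; infer_instance
def pvWitness_outputTrimmedBoard : List (List String) := [[" ", "x"], ["y", " "]]
-- On a board whose single row is entirely spaces, A returns the leftover of its extrema seeds
-- ([[' ']] for a 1-cell row, [[]] for a wider row) while B returns [], the bounding box of
-- empty content, which is the intended trim.
def D_outputTrimmedBoard (board : List (List String)) : Prop :=
  board.length = 1 ∧ board.headD [] ≠ [] ∧ ∀ cell ∈ board.headD [], cell = " "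
instance (board : List (List String)) : Decidable (D_outputTrimmedBoard board) := by
  unfold D_outputTrimmedBoard; infer_instance
def Spec_outputTrimmedBoard (board : List (List String)) (out : List (List String)) : Prop :=
  ¬ D_outputTrimmedBoard board → out = outputTrimmedBoard_alt board
instance (board : List (List String)) (out : List (List String)) : Decidable (Spec_outputTrimmedBoard board out) := by unfold Spec_outputTrimmedBoard; infer_instance
def pvDiffWitness_outputTrimmedBoard : List (List String) := [[" "]]
def pvDiffWitnessOut_outputTrimmedBoard : (List (List String)) × (List (List String)) :=
  ([[" "]], [])

-- ===== CLAIM (what is proved, stated in full; the proofs are below) =====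
def Claim_unchanged_outputTrimmedBoard : Prop := ∀ (board : List (List String)), Dom_outputTrimmedBoard board → Pre_outputTrimmedBoard board → Spec_outputTrimmedBoard board (outputTrimmedBoard board)
def Claim_changed_outputTrimmedBoard : Prop := Dom_outputTrimmedBoard (pvDiffWitness_outputTrimmedBoard) ∧ Pre_outputTrimmedBoard (pvDiffWitness_outputTrimmedBoard) ∧ D_outputTrimmedBoard (pvDiffWitness_outputTrimmedBoard) ∧ outputTrimmedBoard (pvDiffWitness_outputTrimmedBoard) = pvDiffWitnessOut_outputTrimmedBoard.1 ∧ outputTrimmedBoard_alt (pvDiffWitness_outputTrimmedBoard) = pvDiffWitnessOut_outputTrimmedBoard.2 ∧ pvDiffWitnessOut_outputTrimmedBoard.1 ≠ pvDiffWitnessOut_outputTrimmedBoard.2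
def Claim_exact_outputTrimmedBoard : Prop := ∀ (board : List (List String)), Dom_outputTrimmedBoard board → Pre_outputTrimmedBoard board → D_outputTrimmedBoard board → outputTrimmedBoard board ≠ outputTrimmedBoard_alt board

-- ===== LEMMAS AND PROOFS =====

-- a fold that applies `op` only on elements satisfying `q` is a plain `op`-fold over the filtered projections
theorem pv_foldl_ite_filter {α : Type} (op : Int → Int → Int) (q : α → Prop) [DecidablePred q]
    (v : α → Int) (l : List α) (a : Int) :
    l.foldl (fun m x => if q x then op m (v x) else m) a
      = ((l.filter (fun x => decide (q x))).map v).foldl op a := by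
  induction l generalizing a with
  | nil => rfl
  | cons x l ih =>
    by_cases hx : q x <;> simp [hx, ih]

theorem pv_foldl_min_le_init (l : List Int) (a : Int) : l.foldl min a ≤ a := by
  induction l generalizing a with
  | nil => simp
  | cons x l ih => exact le_trans (ih _) (min_le_left _ _)

theorem pv_foldl_min_le_mem (l : List Int) : ∀ (a x : Int), x ∈ l → l.foldl min a ≤ x := by
  induction l with
  | nil => intro a x hx; simp at hx
  | cons y l ih =>
    intro a x hx
    rw [List.foldl_cons]
    rcases List.mem_cons.mp hx with h | h
    · subst h; exact le_trans (pv_foldl_min_le_init _ _) (min_le_right _ _)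
    · exact ih _ _ h

theorem pv_foldl_min_mem (l : List Int) (a : Int) :
    l.foldl min a = a ∨ l.foldl min a ∈ l := by
  induction l generalizing a with
  | nil => left; rfl
  | cons x l ih =>
    rw [List.foldl_cons]
    rcases ih (min a x) with h | h
    · rcases le_or_gt a x with hax | hax
      · left; rw [h, min_eq_left hax]
      · right; rw [h, min_eq_right (le_of_lt hax)]; exact List.mem_cons_self
    · right; exact List.mem_cons_of_mem _ h

theorem pv_foldl_max_le_init (l : List Int) (a : Int) : a ≤ l.foldl max a := by
  induction l generalizing a with
  | nil => simp
  | cons x l ih => exact le_trans (le_max_left _ _) (ih _)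

theorem pv_foldl_max_le_mem (l : List Int) : ∀ (a x : Int), x ∈ l → x ≤ l.foldl max a := by
  induction l with
  | nil => intro a x hx; simp at hx
  | cons y l ih =>
    intro a x hx
    rw [List.foldl_cons]
    rcases List.mem_cons.mp hx with h | h
    · subst h; exact le_trans (le_max_right _ _) (pv_foldl_max_le_init _ _)
    · exact ih _ _ h

theorem pv_foldl_max_mem (l : List Int) (a : Int) :
    l.foldl max a = a ∨ l.foldl max a ∈ l := by
  induction l generalizing a with
  | nil => left; rfl
  | cons x l ih =>
    rw [List.foldl_cons]
    rcases ih (max a x) with h | h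
    · rcases le_or_gt x a with hax | hax
      · left; rw [h, max_eq_left hax]
      · right; rw [h, max_eq_right (le_of_lt hax)]; exact List.mem_cons_self
    · right; exact List.mem_cons_of_mem _ h

theorem pv_foldl_min_congr_mem (l₁ l₂ : List Int) (a : Int)
    (h : ∀ x, x ∈ l₁ ↔ x ∈ l₂) : l₁.foldl min a = l₂.foldl min a := by
  apply le_antisymm
  · rcases pv_foldl_min_mem l₂ a with h2 | h2
    · rw [h2]; exact pv_foldl_min_le_init _ _
    · exact pv_foldl_min_le_mem _ _ _ ((h _).mpr h2)
  · rcases pv_foldl_min_mem l₁ a with h1 | h1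
    · rw [h1]; exact pv_foldl_min_le_init _ _
    · exact pv_foldl_min_le_mem _ _ _ ((h _).mp h1)

theorem pv_foldl_max_congr_mem (l₁ l₂ : List Int) (a : Int)
    (h : ∀ x, x ∈ l₁ ↔ x ∈ l₂) : l₁.foldl max a = l₂.foldl max a := by
  apply le_antisymm
  · rcases pv_foldl_max_mem l₁ a with h1 | h1
    · rw [h1]; exact pv_foldl_max_le_init _ _
    · exact pv_foldl_max_le_mem _ _ _ ((h _).mp h1)
  · rcases pv_foldl_max_mem l₂ a with h2 | h2
    · rw [h2]; exact pv_foldl_max_le_init _ _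
    · exact pv_foldl_max_le_mem _ _ _ ((h _).mpr h2)

-- B's min()/max() over a nonempty list equals A's seeded fold when the seed does not bind
theorem pv_min?_foldl (l : List Int) (seed m : Int)
    (h : PySem.List.min? l (fun x => x) = some m) (hm : m ≤ seed) : l.foldl min seed = m := by
  apply le_antisymm
  · exact pv_foldl_min_le_mem l seed m (PySem.List.min?_mem h)
  · rcases pv_foldl_min_mem l seed with h1 | h1
    · rw [h1]; exact hm
    · exact PySem.List.min?_isMin h _ h1

theorem pv_max?_foldl (l : List Int) (seed m : Int)
    (h : PySem.List.max? l (fun x => x) = some m) (hm : seed ≤ m) : l.foldl max seed = m := by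
  apply le_antisymm
  · rcases pv_foldl_max_mem l seed with h1 | h1
    · rw [h1]; exact hm
    · exact PySem.List.max?_isMax h _ h1
  · exact pv_foldl_max_le_mem l seed m (PySem.List.max?_mem h)

-- the nested two-level fold of A over (row, col) equals the fold over the flattened pair list
theorem pv_foldl_nested_eq_flat {σ : Type} (l₁ l₂ : List Int) (g : σ → Int × Int → σ) (init : σ) :
    l₁.foldl (fun s r => l₂.foldl (fun s c => g s (r, c)) s) init
      = (l₁.flatMap (fun r => l₂.map (fun c => (r, c)))).foldl g init := by
  induction l₁ generalizing init with
  | nil => rfl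
  | cons r l₁ ih => simp [List.flatMap_cons, List.foldl_append, List.foldl_map, ih]

-- a fold of a 4-tuple state whose components evolve independently splits into four folds
theorem pv_foldl_prod4 {α : Type} (f : (Int × Int × Int × Int) → α → (Int × Int × Int × Int))
    (f1 f2 f3 f4 : Int → α → Int)
    (hf : ∀ s x, f s x = (f1 s.1 x, f2 s.2.1 x, f3 s.2.2.1 x, f4 s.2.2.2 x))
    (l : List α) (a b c d : Int) :
    l.foldl f (a, b, c, d)
      = (l.foldl f1 a, l.foldl f2 b, l.foldl f3 c, l.foldl f4 d) := by
  induction l generalizing a b c d with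
  | nil => rfl
  | cons x l ih => simp only [List.foldl_cons, hf]; exact ih _ _ _ _

-- proof-only abbreviations: the flattened pair scan of A and its extrema
def pvPairs (board : List (List String)) : List (Int × Int) :=
  (PySem.List.pyRange 0 (board.length : Int)).flatMap (fun r =>
    (PySem.List.pyRange 0 (altC board)).map (fun c => (r, c)))
def pvHits (board : List (List String)) : List (Int × Int) :=
  (pvPairs board).filter (fun p =>
    decide (PySem.List.pyGetD (PySem.List.pyGetD board p.1 []) p.2 "" ≠ " "))
def pvMinC (b : List (List String)) : Int := ((pvHits b).map (·.2)).foldl min (altC b - 1)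
def pvMinR (b : List (List String)) : Int := ((pvHits b).map (·.1)).foldl min ((b.length : Int) - 1)
def pvMaxC (b : List (List String)) : Int := ((pvHits b).map (·.2)).foldl max 0
def pvMaxR (b : List (List String)) : Int := ((pvHits b).map (·.1)).foldl max 0

theorem pv_mem_hits (board : List (List String)) (r c : Int) :
    (r, c) ∈ pvHits board ↔ (0 ≤ r ∧ r < (board.length : Int) ∧ 0 ≤ c ∧ c < altC board ∧
      PySem.List.pyGetD (PySem.List.pyGetD board r []) c "" ≠ " ") := by
  simp [pvHits, pvPairs, List.mem_filter, List.mem_flatMap, PySem.List.mem_pyRange_one]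
  tauto

-- A's state fold equals the four extrema of the flattened hit list
theorem pv_A_char (board : List (List String)) :
    outputTrimmedBoard board =
      (PySem.List.pyRange 0 (pvMaxR board - pvMinR board + 1)).map (fun r =>
        (PySem.List.pyRange 0 (pvMaxC board - pvMinC board + 1)).map (fun c =>
          PySem.List.pyGetD (PySem.List.pyGetD board (pvMinR board + r) []) (pvMinC board + c) "")) := by
  have h1 := pv_foldl_nested_eq_flat (σ := Int × Int × Int × Int)
      (PySem.List.pyRange 0 (board.length : Int))
      (PySem.List.pyRange 0 ((((PySem.List.pyGet? board 0).getD []).length : Int)))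
      (fun s p => if PySem.List.pyGetD (PySem.List.pyGetD board p.1 []) p.2 "" ≠ " " then
          (min s.1 p.2, min s.2.1 p.1, max s.2.2.1 p.2, max s.2.2.2 p.1) else s)
      (((((PySem.List.pyGet? board 0).getD []).length : Int) - 1, (board.length : Int) - 1, 0, 0))
  have h2 := pv_foldl_prod4
      (f := fun s p => if PySem.List.pyGetD (PySem.List.pyGetD board p.1 []) p.2 "" ≠ " " then
          (min s.1 p.2, min s.2.1 p.1, max s.2.2.1 p.2, max s.2.2.2 p.1) else s)
      (fun m p => if PySem.List.pyGetD (PySem.List.pyGetD board p.1 []) p.2 "" ≠ " " then min m p.2 else m)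
      (fun m p => if PySem.List.pyGetD (PySem.List.pyGetD board p.1 []) p.2 "" ≠ " " then min m p.1 else m)
      (fun m p => if PySem.List.pyGetD (PySem.List.pyGetD board p.1 []) p.2 "" ≠ " " then max m p.2 else m)
      (fun m p => if PySem.List.pyGetD (PySem.List.pyGetD board p.1 []) p.2 "" ≠ " " then max m p.1 else m)
      (by
        intro s x
        by_cases hx : PySem.List.pyGetD (PySem.List.pyGetD board x.1 []) x.2 "" ≠ " " <;> simp [hx])
      (pvPairs board)
      ((((PySem.List.pyGet? board 0).getD []).length : Int) - 1) ((board.length : Int) - 1) 0 0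
  have h3 : ((pvPairs board).foldl (fun m p => if PySem.List.pyGetD (PySem.List.pyGetD board p.1 []) p.2 "" ≠ " " then min m p.2 else m) ((((PySem.List.pyGet? board 0).getD []).length : Int) - 1),
            (pvPairs board).foldl (fun m p => if PySem.List.pyGetD (PySem.List.pyGetD board p.1 []) p.2 "" ≠ " " then min m p.1 else m) ((board.length : Int) - 1),
            (pvPairs board).foldl (fun m p => if PySem.List.pyGetD (PySem.List.pyGetD board p.1 []) p.2 "" ≠ " " then max m p.2 else m) 0,
            (pvPairs board).foldl (fun m p => if PySem.List.pyGetD (PySem.List.pyGetD board p.1 []) p.2 "" ≠ " " then max m p.1 else m) 0)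
      = ((pvMinC board, pvMinR board, pvMaxC board, pvMaxR board) : Int × Int × Int × Int) := by
    rw [pv_foldl_ite_filter min, pv_foldl_ite_filter min, pv_foldl_ite_filter max,
      pv_foldl_ite_filter max]
    rfl
  have hstate := h1.trans (h2.trans h3)
  simp only [outputTrimmedBoard]
  rw [hstate]

theorem pv_cols_eq (board : List (List String)) (c : Int) :
    c ∈ altColsWith board ↔ c ∈ (pvHits board).map (·.2) := by
  constructor
  · intro hc
    rw [altColsWith, List.mem_filter] at hc
    obtain ⟨hcr, hany⟩ := hc
    rw [PySem.List.mem_pyRange_one] at hcr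
    rcases List.any_eq_true.mp hany with ⟨row, hrow, hne⟩
    replace hne := of_decide_eq_true hne
    rcases List.mem_iff_getElem.mp hrow with ⟨k, hk, hkr⟩
    rw [List.mem_map]
    refine ⟨((k : Int), c), ?_, rfl⟩
    rw [pv_mem_hits]
    have hkZ : (k : Int) < (board.length : Int) := by exact_mod_cast hk
    refine ⟨Int.natCast_nonneg k, hkZ, hcr.1, hcr.2, ?_⟩
    rw [PySem.List.pyGetD_eq_getElem board [] (Int.natCast_nonneg k) hkZ]
    simpa [hkr] using hne
  · intro hc
    rcases List.mem_map.mp hc with ⟨p, hp, hpc⟩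
    obtain ⟨r, c'⟩ := p
    rcases (pv_mem_hits board r c').mp hp with ⟨h0r, hrR, h0, hC, hne⟩
    subst hpc
    rw [altColsWith, List.mem_filter]
    refine ⟨PySem.List.mem_pyRange_one.mpr ⟨h0, hC⟩, List.any_eq_true.mpr ?_⟩
    refine ⟨PySem.List.pyGetD board r [], ?_, decide_eq_true hne⟩
    apply PySem.List.pyGetD_mem
    simp [PySem.Raise.InRange]
    omega

theorem pv_rows_eq (board : List (List String)) (r : Int) :
    r ∈ altRowsWith board ↔ r ∈ (pvHits board).map (·.1) := by
  constructor
  · intro h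
    rcases List.mem_filterMap.mp h with ⟨p, hp, hfp⟩
    rcases (PySem.List.mem_enumerate_iff board 0 p).mp hp with ⟨k, hk, rfl⟩
    split_ifs at hfp with hcond
    · rcases List.any_eq_true.mp hcond with ⟨c, hc, hne⟩
      replace hne := of_decide_eq_true hne
      rw [PySem.List.mem_pyRange_one] at hc
      have hr : r = (k : Int) := by
        have := Option.some.inj hfp; omega
      subst hr
      have hkZ : (k : Int) < (board.length : Int) := by exact_mod_cast hk
      refine List.mem_map.mpr ⟨((k : Int), c), ?_, rfl⟩
      rw [pv_mem_hits]
      refine ⟨Int.natCast_nonneg k, hkZ, hc.1, hc.2, ?_⟩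
      rw [PySem.List.pyGetD_eq_getElem board [] (Int.natCast_nonneg k) hkZ]
      simpa using hne
  · intro h
    rcases List.mem_map.mp h with ⟨p, hp, hpr⟩
    obtain ⟨r', c⟩ := p
    rcases (pv_mem_hits board r' c).mp hp with ⟨h0r, hrR, h0c, hcC, hne⟩
    have hr : r = r' := by simpa using hpr.symm
    subst hr
    have hrN : r.toNat < board.length := by omega
    apply List.mem_filterMap.mpr
    refine ⟨(r, board[r.toNat]), ?_, ?_⟩
    · rw [PySem.List.mem_enumerate_iff]
      exact ⟨r.toNat, hrN, by simp [Int.toNat_of_nonneg h0r]⟩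
    · have hcondT : (PySem.List.pyRange 0 (altC board)).any
          (fun c => PySem.List.pyGetD board[r.toNat] c "" ≠ " ") = true := by
        refine List.any_eq_true.mpr ⟨c, PySem.List.mem_pyRange_one.mpr ⟨h0c, hcC⟩, decide_eq_true ?_⟩
        rw [PySem.List.pyGetD_eq_getElem board [] h0r hrR] at hne
        exact hne
      simp only [hcondT, if_true]

-- an indexed range comprehension over one row equals the corresponding slice
theorem pv_inner (row : List String) (mnC mxC : Int)
    (h0 : 0 ≤ mnC) (h0' : 0 ≤ mxC) (hlt : mxC < (row.length : Int)) :
    (PySem.List.pyRange 0 (mxC - mnC + 1)).map (fun c => PySem.List.pyGetD row (mnC + c) "")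
      = PySem.List.slice row (some mnC) (some (mxC + 1)) := by
  rw [PySem.List.slice_toNat row h0 (by omega)]
  apply List.ext_getElem
  · simp [PySem.List.length_pyRange_one]
    omega
  · intro k hk1 hk2
    have hkN : k < (mxC - mnC + 1).toNat := by
      simpa [PySem.List.length_pyRange_one] using hk1
    simp only [List.getElem_map, PySem.List.getElem_pyRange_one, List.getElem_take,
      List.getElem_drop]
    rw [PySem.List.pyGetD_eq_getElem row "" (by omega) (by omega)]
    simp only [show (mnC + (0 + (k : Int))).toNat = mnC.toNat + k from by omega]

-- the whole rebuilt box equals the corresponding nested slices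
theorem pv_box (board : List (List String)) (mnR mxR mnC mxC : Int)
    (h0mnR : 0 ≤ mnR) (h0mxR : 0 ≤ mxR) (hmxR : mxR < (board.length : Int))
    (h0mnC : 0 ≤ mnC) (h0mxC : 0 ≤ mxC)
    (hcols : ∀ row ∈ board, mxC < (row.length : Int)) :
    (PySem.List.pyRange 0 (mxR - mnR + 1)).map (fun r =>
      (PySem.List.pyRange 0 (mxC - mnC + 1)).map (fun c =>
        PySem.List.pyGetD (PySem.List.pyGetD board (mnR + r) []) (mnC + c) ""))
    = (PySem.List.slice board (some mnR) (some (mxR + 1))).map (fun row =>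
        PySem.List.slice row (some mnC) (some (mxC + 1))) := by
  rw [PySem.List.slice_toNat board h0mnR (by omega)]
  apply List.ext_getElem
  · simp [PySem.List.length_pyRange_one]
    omega
  · intro k hk1 hk2
    have hkN : k < (mxR - mnR + 1).toNat := by
      simpa [PySem.List.length_pyRange_one] using hk1
    simp only [List.getElem_map, PySem.List.getElem_pyRange_one, List.getElem_take,
      List.getElem_drop]
    rw [PySem.List.pyGetD_eq_getElem board [] (by omega) (by omega)]
    simp only [show (mnR + (0 + (k : Int))).toNat = mnR.toNat + k from by omega]
    exact pv_inner _ _ _ h0mnC h0mxC (hcols _ (List.getElem_mem (by omega)))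

-- under D_, the hit list is empty
theorem pv_hits_nil_of_D (board : List (List String)) (hD : D_outputTrimmedBoard board) :
    pvHits board = [] := by
  obtain ⟨hlen, hne, hall⟩ := hD
  rw [List.eq_nil_iff_forall_not_mem]
  intro p hp
  obtain ⟨r, c⟩ := p
  rcases (pv_mem_hits board r c).mp hp with ⟨h0r, hrR, h0c, hcC, hcell⟩
  have hr0 : r = 0 := by omega
  subst hr0
  have hC_eq : altC board = ((board.headD []).length : Int) := by
    cases board with
    | nil => simp at hlen
    | cons h t => simp [altC]
  have hhead : PySem.List.pyGetD board 0 [] = board.headD [] := by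
    cases board with
    | nil => simp at hlen
    | cons h t => simp [PySem.List.pyGetD_zero_cons]
  rw [hhead] at hcell
  rw [hC_eq] at hcC
  rw [PySem.List.pyGetD_eq_getElem _ "" h0c (by exact_mod_cast hcC)] at hcell
  exact hcell (hall _ (List.getElem_mem (by omega)))

theorem pv_rowsWith_nil_iff (board : List (List String)) :
    altRowsWith board = [] ↔ pvHits board = [] := by
  constructor
  · intro h
    rw [List.eq_nil_iff_forall_not_mem]
    intro p hp
    have : p.1 ∈ altRowsWith board :=
      (pv_rows_eq board p.1).mpr (List.mem_map.mpr ⟨p, hp, rfl⟩)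
    rw [h] at this
    simp at this
  · intro h
    rw [List.eq_nil_iff_forall_not_mem]
    intro r hr
    have := (pv_rows_eq board r).mp hr
    rw [h] at this
    simp at this

-- ===== VERDICT =====
theorem outputTrimmedBoard_spec : Claim_unchanged_outputTrimmedBoard := by
  intro board hdom hpre
  unfold Spec_outputTrimmedBoard
  intro hnD
  obtain ⟨hne, hrows, hdeg⟩ := hpre
  have hC_eq : altC board = ((board.headD []).length : Int) := by
    cases board with
    | nil => cases hne rfl
    | cons h t => simp [altC]
  have hCnn : 0 ≤ altC board := by unfold altC; omega
  have hrows' : ∀ row ∈ board, altC board ≤ (row.length : Int) := by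
    intro row hr
    rw [hC_eq]
    exact_mod_cast hrows row hr
  have hlen1 : 1 ≤ board.length := List.length_pos_of_ne_nil hne
  by_cases hhits : pvHits board = []
  · -- no non-space cell: B returns []; A's box is empty unless the board is a single all-space row,
    -- which is exactly D_ (excluded here)
    have hrw : altRowsWith board = [] := (pv_rowsWith_nil_iff board).mpr hhits
    have hB : outputTrimmedBoard_alt board = [] := by
      simp [outputTrimmedBoard_alt, hrw]
    rw [hB, pv_A_char]
    have hminR : pvMinR board = (board.length : Int) - 1 := by simp [pvMinR, hhits]
    have hmaxR : pvMaxR board = 0 := by simp [pvMaxR, hhits]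
    rcases Nat.lt_or_ge board.length 2 with hR | hR
    · -- board has exactly one row: it must contain a non-space cell, else D_ holds
      exfalso
      have hlen : board.length = 1 := by omega
      have hhd : board.headD [] ≠ [] := by
        intro hh
        exact hdeg ⟨hlen, hh⟩
      apply hnD
      refine ⟨hlen, hhd, ?_⟩
      intro cell hcell
      by_contra hcs
      rcases List.mem_iff_getElem.mp hcell with ⟨k, hk, hkc⟩
      have hhead : PySem.List.pyGetD board 0 [] = board.headD [] := by
        cases board with
        | nil => cases hne rfl
        | cons h t => simp [PySem.List.pyGetD_zero_cons]
      have hmem : ((0 : Int), (k : Int)) ∈ pvHits board := by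
        rw [pv_mem_hits]
        refine ⟨le_refl 0, by omega, Int.natCast_nonneg k, by rw [hC_eq]; exact_mod_cast hk, ?_⟩
        rw [hhead, PySem.List.pyGetD_ofNat (board.headD []) k "" hk, hkc]
        exact hcs
      rw [hhits] at hmem
      simp at hmem
    · rw [hminR, hmaxR,
        PySem.List.pyRange_one_eq_nil (a := 0) (b := 0 - ((board.length : Int) - 1) + 1) (by omega)]
      simp
  · -- at least one non-space cell: both sides compute the true bounding box
    obtain ⟨p, hp⟩ := List.exists_mem_of_ne_nil _ hhits
    have hrne : altRowsWith board ≠ [] := by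
      intro h
      rw [(pv_rowsWith_nil_iff board).mp h] at hp
      simp at hp
    have hcne : altColsWith board ≠ [] := by
      intro h
      have : p.2 ∈ altColsWith board :=
        (pv_cols_eq board p.2).mpr (List.mem_map.mpr ⟨p, hp, rfl⟩)
      rw [h] at this
      simp at this
    have hfst : ∀ x ∈ (pvHits board).map (·.1), 0 ≤ x ∧ x < (board.length : Int) := by
      intro x hx
      rcases List.mem_map.mp hx with ⟨q, hq, rfl⟩
      obtain ⟨r, c⟩ := q
      rcases (pv_mem_hits board r c).mp hq with ⟨a, b, _, _, _⟩
      exact ⟨a, b⟩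
    have hsnd : ∀ x ∈ (pvHits board).map (·.2), 0 ≤ x ∧ x < altC board := by
      intro x hx
      rcases List.mem_map.mp hx with ⟨q, hq, rfl⟩
      obtain ⟨r, c⟩ := q
      rcases (pv_mem_hits board r c).mp hq with ⟨_, _, a, b, _⟩
      exact ⟨a, b⟩
    -- B's four min/max equal A's four seeded folds
    obtain ⟨rA, rT, hrAT⟩ := List.exists_cons_of_ne_nil hrne
    obtain ⟨cA, cT, hcAT⟩ := List.exists_cons_of_ne_nil hcne
    obtain ⟨mR, hmR⟩ : ∃ m, PySem.List.min? (altRowsWith board) (fun x => x) = some m :=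
      ⟨_, by rw [hrAT, PySem.List.min?_id_cons]⟩
    obtain ⟨xR, hxR⟩ : ∃ m, PySem.List.max? (altRowsWith board) (fun x => x) = some m :=
      ⟨_, by rw [hrAT, PySem.List.max?_id_cons]⟩
    obtain ⟨mC, hmC⟩ : ∃ m, PySem.List.min? (altColsWith board) (fun x => x) = some m :=
      ⟨_, by rw [hcAT, PySem.List.min?_id_cons]⟩
    obtain ⟨xC, hxC⟩ : ∃ m, PySem.List.max? (altColsWith board) (fun x => x) = some m :=
      ⟨_, by rw [hcAT, PySem.List.max?_id_cons]⟩
    have hmRmem := (pv_rows_eq board mR).mp (PySem.List.min?_mem hmR)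
    have hxRmem := (pv_rows_eq board xR).mp (PySem.List.max?_mem hxR)
    have hmCmem := (pv_cols_eq board mC).mp (PySem.List.min?_mem hmC)
    have hxCmem := (pv_cols_eq board xC).mp (PySem.List.max?_mem hxC)
    have heqmR : pvMinR board = mR := by
      rw [pvMinR, ← pv_foldl_min_congr_mem _ _ _ (pv_rows_eq board)]
      exact pv_min?_foldl _ _ _ hmR (by have := (hfst _ hmRmem).2; omega)
    have heqxR : pvMaxR board = xR := by
      rw [pvMaxR, ← pv_foldl_max_congr_mem _ _ _ (pv_rows_eq board)]
      exact pv_max?_foldl _ _ _ hxR (hfst _ hxRmem).1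
    have heqmC : pvMinC board = mC := by
      rw [pvMinC, ← pv_foldl_min_congr_mem _ _ _ (pv_cols_eq board)]
      exact pv_min?_foldl _ _ _ hmC (by have := (hsnd _ hmCmem).2; omega)
    have heqxC : pvMaxC board = xC := by
      rw [pvMaxC, ← pv_foldl_max_congr_mem _ _ _ (pv_cols_eq board)]
      exact pv_max?_foldl _ _ _ hxC (hsnd _ hxCmem).1
    have hrwE : (altRowsWith board).isEmpty = false := by
      cases h : altRowsWith board with
      | nil => exact absurd h hrne
      | cons a l => rfl
    have hB : outputTrimmedBoard_alt board
        = (PySem.List.slice board (some mR) (some (xR + 1))).map (fun row =>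
            PySem.List.slice row (some mC) (some (xC + 1))) := by
      simp [outputTrimmedBoard_alt, hrwE, hmR, hxR, hmC, hxC]
    rw [pv_A_char, hB, heqmR, heqxR, heqmC, heqxC]
    apply pv_box
    · exact (hfst _ hmRmem).1
    · exact (hfst _ hxRmem).1
    · exact (hfst _ hxRmem).2
    · exact (hsnd _ hmCmem).1
    · exact (hsnd _ hxCmem).1
    · intro row hrow
      have h1 := (hsnd _ hxCmem).2
      have h2 := hrows' row hrow
      omega

theorem outputTrimmedBoard_changed : Claim_changed_outputTrimmedBoard := by
  unfold Claim_changed_outputTrimmedBoard; decide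

theorem outputTrimmedBoard_tight : Claim_exact_outputTrimmedBoard := by
  intro board hdom hpre hD
  have hhits := pv_hits_nil_of_D board hD
  have hrw : altRowsWith board = [] := (pv_rowsWith_nil_iff board).mpr hhits
  have hB : outputTrimmedBoard_alt board = [] := by
    simp [outputTrimmedBoard_alt, hrw]
  rw [hB, pv_A_char]
  have hminR : pvMinR board = 0 := by simp [pvMinR, hhits, hD.1]
  have hmaxR : pvMaxR board = 0 := by simp [pvMaxR, hhits]
  intro heq
  have := congrArg List.length heq
  rw [List.length_map, PySem.List.length_pyRange_one, hminR, hmaxR] at this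
  simp at this
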